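-- pv_equiv track=rewrite | github.com/Alt3z/Python_various_projects | Алгоритм шифрования "Магма"/main.py | bits_array_to_string
-- ===== SOURCE A (Python) =====
-- def bits_array_to_string(data): # Функция для байтов в строку
--     bits = ''.join(f'{num:064b}' for num in data) # Объединяем массив целых чисел в одну строку битов
--
--     # Разбиваем строку битов на 8-битные байты
--     byte_size = 8
--     byte_list = []
--     for i in range(0, len(bits), byte_size):
--         byte = bits[i:i + byte_size]
--         byte_list.append(int(byte, 2))
--
--     # Преобразуем байты обратно в строку с использованием UTF-8
--     byte_data = bytearray(byte_list)
--     text = byte_data.decode('utf-8')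
--
--     # Удаляем нулевые символы в конце
--     return text.rstrip('\x00')
-- ===== SOURCE B (Python) =====
-- def bits_array_to_string(data):
--     buf = bytearray()
--     for num in data:
--         buf += num.to_bytes(8, 'big')
--     return buf.decode('utf-8').rstrip('\x00')
-- ===== Notes on version B (the rewrite author's own statement) =====
-- stated objective: simpler
-- what changed: B builds the raw bytes directly with num.to_bytes(8,'big') into one bytearray instead of formatting each int as a 64-char binary string, joining, re-slicing into 8-char windows and re-parsing each window with int(.,2).
-- outside the precondition, e.g. on bits_array_to_string([-5]): A returns '\x00\x00\x00\x00\x00\x00\x00\x05', B raises OverflowError; on bits_array_to_string([50089]): A returns '\x00\x00\x00\x00\x00\x00é', B returns '\x00\x00\x00\x00\x00\x00é'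
import Mathlib
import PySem

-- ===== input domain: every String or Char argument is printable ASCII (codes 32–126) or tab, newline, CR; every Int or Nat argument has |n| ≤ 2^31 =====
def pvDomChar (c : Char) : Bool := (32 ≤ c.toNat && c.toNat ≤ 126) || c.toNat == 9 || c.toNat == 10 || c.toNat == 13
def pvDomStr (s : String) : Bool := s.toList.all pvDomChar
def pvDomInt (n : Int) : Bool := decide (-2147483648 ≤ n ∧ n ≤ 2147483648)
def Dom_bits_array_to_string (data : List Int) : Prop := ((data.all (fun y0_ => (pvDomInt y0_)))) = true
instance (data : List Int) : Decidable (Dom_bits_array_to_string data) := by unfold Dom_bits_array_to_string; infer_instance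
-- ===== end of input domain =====

-- B builds the bytes by direct arithmetic extraction (to_bytes) into one buffer instead of
-- A's format-to-64-bit-binary-text, re-slice into 8-char windows, re-parse pipeline (simpler).

-- ===== PORT A =====
-- f'{num:064b}' as a list of '0'/'1' chars; exact for 0 ≤ num (negatives are outside Pre_)
def pvBin : Nat → Int → List Char
  | 0, _ => []
  | k + 1, n => pvBin k (n / 2) ++ [if n % 2 == 1 then '1' else '0']

-- int(byte, 2) on a string of '0'/'1' chars
def pvBinVal (cs : List Char) : Int :=
  cs.foldl (fun a c => 2 * a + (if c == '1' then 1 else 0)) 0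

-- text.rstrip('\x00')
def pvRstrip0 (cs : List Char) : List Char :=
  ((cs.reverse).dropWhile (fun c => c == Char.ofNat 0)).reverse

def bits_array_to_string (data : List Int) : String :=
  -- bits = ''.join(f'{num:064b}' for num in data)
  let bits : List Char := (data.map (pvBin 64)).flatten
  -- for i in range(0, len(bits), 8): byte_list.append(int(bits[i:i+8], 2))
  let byteList : List Int :=
    (PySem.List.pyRange 0 (bits.length : Int) 8).foldl
      (fun acc i => acc ++ [pvBinVal (PySem.List.slice bits (some i) (some (i + 8)))]) []
  -- bytearray(byte_list).decode('utf-8'); exact for ASCII bytes (< 128, guaranteed by Pre_)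
  let text : List Char := byteList.map (fun b => Char.ofNat b.toNat)
  -- return text.rstrip('\x00')
  String.mk (pvRstrip0 text)

-- ===== PORT B =====
-- num.to_bytes(8, 'big'); exact for 0 ≤ num < 2^64 (negatives are outside Pre_)
def pvBytesBE (n : Int) : List Int :=
  (List.range 8).map (fun k => (n / 2 ^ (8 * (7 - k))) % 256)

def bits_array_to_string_alt (data : List Int) : String :=
  -- buf = bytearray(); for num in data: buf += num.to_bytes(8, 'big')
  let buf : List Int := data.foldl (fun acc n => acc ++ pvBytesBE n) []
  -- buf.decode('utf-8').rstrip('\x00'); decode exact for ASCII bytes (Pre_)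
  String.mk (pvRstrip0 (buf.map (fun b => Char.ofNat b.toNat)))

-- ===== PRECONDITION & SPEC =====
-- Pre_ excludes (a) negative entries, on which Python A returns an accidental value built from a
-- mis-aligned '-…' bit string while Python B raises OverflowError, and (b) entries with a
-- non-ASCII byte, on which Python A raises UnicodeDecodeError except in the rare case that the
-- bytes happen to form valid multi-byte UTF-8 (there both Pythons return the same string; those
-- inputs are excluded only because the decode('utf-8') ports are exact on ASCII bytes).
def Pre_bits_array_to_string (data : List Int) : Prop :=
  ∀ n ∈ data, 0 ≤ n ∧ (n / 16777216) % 256 < 128 ∧ (n / 65536) % 256 < 128 ∧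
    (n / 256) % 256 < 128 ∧ n % 256 < 128
instance (data : List Int) : Decidable (Pre_bits_array_to_string data) := by
  unfold Pre_bits_array_to_string; infer_instance

def pvWitness_bits_array_to_string : List Int := [4801587, 0, 72]

def Spec_bits_array_to_string (data : List Int) (out : String) : Prop := out = bits_array_to_string_alt data
instance (data : List Int) (out : String) : Decidable (Spec_bits_array_to_string data out) := by unfold Spec_bits_array_to_string; infer_instance

-- ===== CLAIM (what is proved, stated in full; the proofs are below) =====
def Claim_equal_bits_array_to_string : Prop := ∀ (data : List Int), Dom_bits_array_to_string data → Pre_bits_array_to_string data → Spec_bits_array_to_string data (bits_array_to_string data)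

-- ===== LEMMAS AND PROOFS =====

theorem pvBin_length (k : Nat) (n : Int) : (pvBin k n).length = k := by
  induction k generalizing n with
  | zero => rfl
  | succ k ih => simp [pvBin, ih]

theorem int_ediv_ediv (n : Int) (k : Nat) : n / 2 / 2 ^ k = n / 2 ^ (k + 1) := by
  rw [Int.ediv_ediv_eq_ediv_mul (by positivity)]
  ring_nf

theorem pvBin_split (k j : Nat) (n : Int) :
    pvBin (j + k) n = pvBin j (n / 2 ^ k) ++ pvBin k n := by
  induction k generalizing n with
  | zero => simp [pvBin]
  | succ k ih =>
      show pvBin ((j + k) + 1) n = _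
      rw [pvBin, ih, int_ediv_ediv, pvBin]
      simp

theorem pvBinVal_append_bit (cs : List Char) (c : Char) :
    pvBinVal (cs ++ [c]) = 2 * pvBinVal cs + (if c == '1' then 1 else 0) := by
  simp [pvBinVal, List.foldl_append]

theorem pvBinVal_pvBin (k : Nat) (n : Int) : pvBinVal (pvBin k n) = n % 2 ^ k := by
  induction k generalizing n with
  | zero => simp [pvBin, pvBinVal]
  | succ k ih =>
      rw [pvBin, pvBinVal_append_bit, ih]
      have h2 : n % 2 = 0 ∨ n % 2 = 1 := Int.emod_two_eq_zero_or_one n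
      have hd : n / 2 % 2 ^ k = n / 2 - 2 ^ k * (n / 2 / 2 ^ k) := by
        rw [Int.emod_def]
      have hd2 : n % 2 ^ (k + 1) = n - 2 ^ (k + 1) * (n / 2 ^ (k + 1)) := by
        rw [Int.emod_def]
      have he : n / 2 / 2 ^ k = n / 2 ^ (k + 1) := int_ediv_ediv n k
      have hn : 2 * (n / 2) + n % 2 = n := Int.ediv_add_emod n 2
      rw [he] at hd
      have hy : (2:Int) ^ (k + 1) * (n / 2 ^ (k + 1)) = 2 * (2 ^ k * (n / 2 ^ (k + 1))) := by ring
      rcases h2 with h | h <;> simp [h] <;> omega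

-- one 64-bit block, cut into its eight 8-bit windows and parsed, gives to_bytes(8,'big')
theorem pvBin_chunks (j : Nat) (n : Int) :
    (List.range j).map (fun k => pvBinVal (((pvBin (8 * j) n).drop (8 * k)).take 8))
      = (List.range j).map (fun k => (n / 2 ^ (8 * (j - 1 - k))) % 256) := by
  induction j generalizing n with
  | zero => rfl
  | succ j ih =>
      have hsplit : pvBin (8 * (j + 1)) n = pvBin 8 (n / 2 ^ (8 * j)) ++ pvBin (8 * j) n := by
        have h : 8 * (j + 1) = 8 + 8 * j := by ring
        rw [h, pvBin_split]
      rw [List.range_succ_eq_map, List.map_cons, List.map_cons, List.map_map, List.map_map]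
      refine congrArg₂ List.cons ?_ ?_
      · rw [hsplit]
        simp only [Nat.mul_zero, List.drop_zero]
        rw [List.take_append_of_le_length (by simp [pvBin_length]),
            List.take_of_length_le (by simp [pvBin_length]), pvBinVal_pvBin]
        norm_num
      · calc (List.range j).map
              ((fun k => pvBinVal (((pvBin (8 * (j + 1)) n).drop (8 * k)).take 8)) ∘ Nat.succ)
            = (List.range j).map (fun k => pvBinVal (((pvBin (8 * j) n).drop (8 * k)).take 8)) := by
              refine List.map_congr_left (fun k _ => ?_)
              simp only [Function.comp_apply]
              rw [hsplit, List.drop_append,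
                  List.drop_eq_nil_of_le (by simp only [pvBin_length]; omega)]
              have h8 : 8 * Nat.succ k - (pvBin 8 (n / 2 ^ (8 * j))).length = 8 * k := by
                simp only [pvBin_length]; omega
              rw [h8, List.nil_append]
          _ = (List.range j).map (fun k => (n / 2 ^ (8 * (j - 1 - k))) % 256) := ih n
          _ = (List.range j).map
              ((fun k => (n / 2 ^ (8 * (j + 1 - 1 - k))) % 256) ∘ Nat.succ) := by
              refine List.map_congr_left (fun k hk => ?_)
              simp only [Function.comp_apply]
              have hjk : j + 1 - 1 - Nat.succ k = j - 1 - k := by omega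
              rw [hjk]

-- flatMap of singletons is map
theorem flatMap_singleton_eq_map {α β : Type} (f : α → β) (l : List α) :
    l.flatMap (fun x => [f x]) = l.map f := by
  induction l with
  | nil => rfl
  | cons x xs ih => simp [ih]

theorem flatten_len64 (data : List Int) :
    ((data.map (pvBin 64)).flatten).length = 64 * data.length := by
  induction data with
  | nil => rfl
  | cons n rest ih => simp [ih, pvBin_length]; ring

theorem pyRange_step8 (L : Nat) :
    PySem.List.pyRange 0 ((64 * L : Nat) : Int) 8
      = (List.range (8 * L)).map (fun k => ((8 * k : Nat) : Int)) := by
  rw [PySem.List.pyRange_of_pos 0 ((64 * L : Nat) : Int) (by norm_num)]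
  have hc : (if (0 : Int) < ((64 * L : Nat) : Int)
      then ((((64 * L : Nat) : Int) - 0 + 8 - 1) / 8).toNat else 0) = 8 * L := by
    split_ifs with h
    · have : ((64 * L : Nat) : Int) = 64 * (L : Int) := by push_cast; ring
      rw [this]
      omega
    · omega
  rw [hc]
  refine List.map_congr_left (fun k _ => ?_)
  push_cast
  ring

-- the chunk-parse of the concatenated bit blocks is the concatenation of the byte lists
theorem chunks_flatMap (data : List Int) :
    (List.range (8 * data.length)).map
        (fun k => pvBinVal ((((data.map (pvBin 64)).flatten).drop (8 * k)).take 8))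
      = data.flatMap pvBytesBE := by
  induction data with
  | nil => rfl
  | cons n rest ih =>
      have hlen : 8 * (n :: rest).length = 8 + 8 * rest.length := by
        simp; ring
      rw [hlen, List.range_add, List.map_append, List.map_map, List.flatMap_cons]
      refine congrArg₂ List.append ?_ ?_
      · -- first eight windows read exactly pvBin 64 n
        have hwin : ∀ k ∈ List.range 8,
            pvBinVal ((((n :: rest).map (pvBin 64)).flatten).drop (8 * k) |>.take 8)
              = pvBinVal (((pvBin 64 n).drop (8 * k)).take 8) := by
          intro k hk
          rw [List.mem_range] at hk
          have hflat : ((n :: rest).map (pvBin 64)).flatten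
              = pvBin 64 n ++ ((rest.map (pvBin 64)).flatten) := by simp
          rw [hflat, List.drop_append]
          have hdl : ((pvBin 64 n).drop (8 * k)).length = 64 - 8 * k := by
            simp [pvBin_length]
          rw [List.take_append_of_le_length (by rw [hdl]; omega)]
        rw [List.map_congr_left hwin]
        have h64 : (64 : Nat) = 8 * 8 := by norm_num
        have := pvBin_chunks 8 n
        rw [h64]
        rw [this]
        rfl
      · -- the remaining windows are the windows of the tail
        have hshift : ∀ k ∈ List.range (8 * rest.length),
            pvBinVal ((((n :: rest).map (pvBin 64)).flatten).drop (8 * (8 + k)) |>.take 8)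
              = pvBinVal ((((rest.map (pvBin 64)).flatten).drop (8 * k)).take 8) := by
          intro k _
          have hflat : ((n :: rest).map (pvBin 64)).flatten
              = pvBin 64 n ++ ((rest.map (pvBin 64)).flatten) := by simp
          rw [hflat, List.drop_append, List.drop_eq_nil_of_le (by simp only [pvBin_length]; omega)]
          have h8 : 8 * (8 + k) - (pvBin 64 n).length = 8 * k := by
            simp only [pvBin_length]; omega
          rw [h8, List.nil_append]
        calc (List.range (8 * rest.length)).map
              ((fun k => pvBinVal ((((n :: rest).map (pvBin 64)).flatten).drop (8 * k) |>.take 8))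
                ∘ (fun x => 8 + x))
            = (List.range (8 * rest.length)).map
              (fun k => pvBinVal ((((rest.map (pvBin 64)).flatten).drop (8 * k)).take 8)) := by
              refine List.map_congr_left (fun k hk => ?_)
              simpa using hshift k hk
          _ = rest.flatMap pvBytesBE := ih

theorem ports_eq (data : List Int) :
    bits_array_to_string data = bits_array_to_string_alt data := by
  have hsl : ∀ k ∈ List.range (8 * data.length),
      ((fun i => pvBinVal (PySem.List.slice ((data.map (pvBin 64)).flatten) (some i) (some (i + 8))))
        ∘ (fun k : Nat => ((8 * k : Nat) : Int))) k
        = pvBinVal ((((data.map (pvBin 64)).flatten).drop (8 * k)).take 8) := by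
    intro k _
    simp only [Function.comp_apply]
    have h8 : ((8 * k : Nat) : Int) + 8 = ((8 * k : Nat) : Int) + ((8 : Nat) : Int) := by
      norm_num
    rw [h8, PySem.List.slice_natCast_add]
  have key : (PySem.List.pyRange 0 ((((data.map (pvBin 64)).flatten).length : Nat) : Int) 8).foldl
      (fun acc i => acc ++
        [pvBinVal (PySem.List.slice ((data.map (pvBin 64)).flatten) (some i) (some (i + 8)))]) []
      = data.foldl (fun acc n => acc ++ pvBytesBE n) [] := by
    rw [PySem.List.foldl_append_eq_flatMap, PySem.List.foldl_append_eq_flatMap,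
        List.nil_append, List.nil_append, flatMap_singleton_eq_map, flatten_len64,
        pyRange_step8, List.map_map, List.map_congr_left hsl, chunks_flatMap]
  unfold bits_array_to_string bits_array_to_string_alt
  dsimp only
  rw [key]

-- ===== VERDICT (by name: the statement is the Claim_ definition above) =====
theorem bits_array_to_string_spec : Claim_equal_bits_array_to_string := by
  intro data _ _
  unfold Spec_bits_array_to_string
  exact (ports_eq data)
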